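-- pv_equiv track=rewrite | github.com/m0ahs/openpoke | server/utils/tool_validation.py | split_known_tools
-- ===== SOURCE A (Python) =====
-- from functools import lru_cache
-- from typing import List, Optional, Set, Tuple
--
-- def split_known_tools(name: str, known_tools: Set[str]) -> List[str]:
--     """
--     Attempt to split a concatenated tool name into known tool identifiers.
--
--     This function tries to detect when an LLM has hallucinated a concatenated
--     tool name by greedily matching against known tool names from longest to shortest.
--
--     Args:
--         name: The potentially concatenated tool name
--         known_tools: Set of valid tool names to match against
--
--     Returns:
--     List of individual tool names if the input is a concatenation,
--     empty list if no valid split is found or the input is a single tool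
--
--     Examples:
--         >>> split_known_tools("send_message_to_agentsend_draft",
--         ...                   {"send_message_to_agent", "send_draft"})
--         ['send_message_to_agent', 'send_draft']
--
--         >>> split_known_tools("gmail_send_email",
--         ...                   {"gmail_send_email"})
--         []  # Single valid tool, not a concatenation
--     """
--
--     separators = {"_", " ", "-", "+"}
--     sorted_tools = tuple(sorted(known_tools, key=len, reverse=True))
--
--     @lru_cache(maxsize=None)
--     def _split_from(index: int) -> Optional[Tuple[str, ...]]:
--         if index >= len(name):
--             return tuple()
--
--         # Allow separators only between tools, not at the very start
--         current = index
--         if current > 0: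
--             while current < len(name) and name[current] in separators:
--                 current += 1
--             if current >= len(name):
--                 return tuple()
--
--         for candidate in sorted_tools:
--             if name.startswith(candidate, current):
--                 remainder = _split_from(current + len(candidate))
--                 if remainder is not None:
--                     return (candidate,) + remainder
--
--         return None
--
--     components = _split_from(0)
--     if not components or len(components) <= 1:
--         return []
--
--     return list(components)
-- ===== SOURCE B (Python) =====
-- def split_known_tools(name, known_tools):
--     separators = {"_", " ", "-", "+"}
--     tool_set = set(known_tools)
--     lengths = sorted({len(t) for t in tool_set}, reverse=True)
--     n = len(name)
--     dp = [None] * n + [[]]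
--     for i in range(n - 1, -1, -1):
--         cur = i
--         if i > 0:
--             while cur < n and name[cur] in separators:
--                 cur += 1
--             if cur >= n:
--                 dp[i] = []
--                 continue
--         for L in lengths:
--             piece = name[cur:cur + L]
--             if cur + L <= n and piece in tool_set:
--                 rest = dp[cur + L]
--                 if rest is not None:
--                     dp[i] = [piece] + rest
--                     break
--     comps = dp[0]
--     return comps if comps and len(comps) > 1 else []
-- ===== Notes on version B (the rewrite author's own statement) =====
-- stated objective: faster
-- what changed: Replaces A's memoized top-down recursion that tests every sorted tool name with startswith at each position by an iterative bottom-up DP table over positions that tries only the distinct tool lengths in descending order and tests each slice by hash-set membership, so the per-position scan over all tools disappears.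
-- outside the precondition, e.g. on split_known_tools('ab', {'', 'ab'}): A returns [], B returns []
import Mathlib
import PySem

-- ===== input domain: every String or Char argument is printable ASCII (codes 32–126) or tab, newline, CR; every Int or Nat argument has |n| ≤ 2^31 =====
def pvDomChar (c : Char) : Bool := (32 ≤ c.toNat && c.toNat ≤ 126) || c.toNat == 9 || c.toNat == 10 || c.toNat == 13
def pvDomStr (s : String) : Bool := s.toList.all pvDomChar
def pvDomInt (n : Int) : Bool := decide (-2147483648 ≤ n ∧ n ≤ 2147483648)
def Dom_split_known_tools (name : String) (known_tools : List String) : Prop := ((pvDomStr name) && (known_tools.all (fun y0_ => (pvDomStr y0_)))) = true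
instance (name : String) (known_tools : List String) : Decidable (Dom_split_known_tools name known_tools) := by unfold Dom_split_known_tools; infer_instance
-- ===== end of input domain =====

-- B replaces A's memoized longest-first recursion that scans every sorted tool at each
-- position by a bottom-up DP table over positions that tries only the distinct tool
-- LENGTHS (descending) and tests the slice by set membership; return value only.

-- ===== PORT A =====

-- the separator set {"_", " ", "-", "+"} (membership test only, order irrelevant)
def pvSeps : List Char := ['_', ' ', '-', '+']

-- 'while current < len(name) and name[current] in separators: current += 1'
def pvSkipSeps (s : List Char) (cur : Nat) : Nat :=
  if h : cur < s.length then
    if s[cur] ∈ pvSeps then pvSkipSeps s (cur + 1) else cur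
  else cur
termination_by s.length - cur

-- name.startswith(c, cur): exact for 0 ≤ cur ≤ len(name), the only way A calls it
def pvStartsWith (s : List Char) (c : List Char) (cur : Nat) : Bool :=
  (s.drop cur).take c.length == c

-- _split_from, transliterated with fuel (Python's recursion is memoized but each call
-- strictly advances the index under Pre_, so fuel = len(name)+1 is never exhausted there;
-- fuel 0 marks the non-terminating case that Pre_ excludes)
def pvA_split (nameL : List Char) (tools : List String) : Nat → Nat → Option (List String)
  | 0, _ => none
  | fuel + 1, index =>
    if nameL.length ≤ index then some []
    else
      let current := if 0 < index then pvSkipSeps nameL index else index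
      if 0 < index ∧ nameL.length ≤ current then some []
      else
        tools.findSome? (fun c =>
          if pvStartsWith nameL c.toList current then
            match pvA_split nameL tools fuel (current + c.toList.length) with
            | some r => some (c :: r)
            | none => none
          else none)

def split_known_tools (name : String) (known_tools : List String) : List String :=
  let nameL := name.toList
  -- sorted(known_tools, key=len, reverse=True); known_tools is a Python set
  let tools := PySem.List.sorted (PySem.Set.ofList known_tools) (fun t => t.toList.length) true
  match pvA_split nameL tools (nameL.length + 1) 0 with
  | none => []
  | some comps => if comps.length ≤ 1 then [] else comps

-- ===== PORT B =====

-- dp[i] := components covering name[i:], None if not computed / no split; one entry i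
def pvB_step (nameL : List Char) (lengths : List Nat) (toolSet : PySem.Set String)
    (i : Nat) (dp : List (Option (List String))) : List (Option (List String)) :=
  let n := nameL.length
  let cur := if 0 < i then pvSkipSeps nameL i else i
  if 0 < i ∧ n ≤ cur then dp.set i (some [])
  else
    match lengths.findSome? (fun L =>
      let piece := String.ofList ((nameL.drop cur).take L)   -- name[cur:cur+L]
      if cur + L ≤ n ∧ PySem.Set.contains toolSet piece then
        match dp.getD (cur + L) none with
        | some rest => some (piece :: rest)
        | none => none
      else none) with
    | some v => dp.set i (some v)
    | none => dp   -- dp[i] stays None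

-- 'for i in range(n-1, -1, -1)': k indices left to process, highest first
def pvB_iter (nameL : List Char) (lengths : List Nat) (toolSet : PySem.Set String) :
    Nat → List (Option (List String)) → List (Option (List String))
  | 0, dp => dp
  | k + 1, dp => pvB_iter nameL lengths toolSet k (pvB_step nameL lengths toolSet k dp)

def split_known_tools_alt (name : String) (known_tools : List String) : List String :=
  let nameL := name.toList
  let n := nameL.length
  let toolSet := PySem.Set.ofList known_tools
  -- sorted({len(t) for t in tool_set}, reverse=True)
  let lengths := PySem.List.sorted (PySem.Set.ofList (toolSet.map (fun t => t.toList.length)))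
      (fun L => L) true
  let dp0 : List (Option (List String)) := List.replicate n none ++ [some []]
  let dp := pvB_iter nameL lengths toolSet n dp0
  match dp.getD 0 none with
  | none => []
  | some comps => if comps.length ≤ 1 then [] else comps

-- ===== PRECONDITION & SPEC =====
-- Pre_ excludes an empty string among the known tools: on such inputs A's recursion can
-- call itself at an unchanged index and raise RecursionError (B simply never uses "").
def Pre_split_known_tools (name : String) (known_tools : List String) : Prop :=
  "" ∉ known_tools
instance (name : String) (known_tools : List String) : Decidable (Pre_split_known_tools name known_tools) := by unfold Pre_split_known_tools; infer_instance

def pvWitness_split_known_tools : String × List String := ("ab", ["a", "b"])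

def Spec_split_known_tools (name : String) (known_tools : List String) (out : List String) : Prop := out = split_known_tools_alt name known_tools
instance (name : String) (known_tools : List String) (out : List String) : Decidable (Spec_split_known_tools name known_tools out) := by unfold Spec_split_known_tools; infer_instance

-- ===== CLAIM (what is proved, stated in full; the proofs are below) =====
def Claim_equal_split_known_tools : Prop := ∀ (name : String) (known_tools : List String), Dom_split_known_tools name known_tools → Pre_split_known_tools name known_tools → Spec_split_known_tools name known_tools (split_known_tools name known_tools)

-- ===== LEMMAS AND PROOFS =====

theorem pv_findSome?_eq_find?_bind {α β : Type} (l : List α) (f : α → Option β) :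
    l.findSome? f = (l.find? (fun a => (f a).isSome)).bind f := by
  induction l with
  | nil => rfl
  | cons a t ih =>
    simp only [List.findSome?_cons, List.find?_cons]
    cases h : f a <;> simp [h, ih]

theorem pv_findSome?_congr {α β : Type} (l : List α) (f g : α → Option β)
    (h : ∀ a ∈ l, f a = g a) : l.findSome? f = l.findSome? g := by
  induction l with
  | nil => rfl
  | cons a t ih =>
    simp only [List.findSome?_cons, h a (List.mem_cons_self)]
    cases g a with
    | some v => rfl
    | none => exact ih (fun x hx => h x (List.mem_cons_of_mem _ hx))

-- find? on an R-pairwise list: every satisfier is the result or R-below it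
theorem pv_find?_max {α : Type} {R : α → α → Prop} {l : List α} {p : α → Bool} {a : α}
    (hp : l.Pairwise R) (h : l.find? p = some a) :
    ∀ b ∈ l, p b → b = a ∨ R a b := by
  induction l with
  | nil => simp at h
  | cons x t ih =>
    rw [List.find?_cons] at h
    rcases List.pairwise_cons.1 hp with ⟨hx, ht⟩
    by_cases hpx : p x
    · simp [hpx] at h
      subst h
      intro b hb _
      rcases List.mem_cons.1 hb with rfl | hb'
      · exact Or.inl rfl
      · exact Or.inr (hx b hb')
    · simp [hpx] at h
      intro b hb hpb
      rcases List.mem_cons.1 hb with rfl | hb'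
      · exact absurd hpb (by simp [hpx])
      · exact ih ht h b hb' hpb

theorem pv_skipSeps_ge (s : List Char) (cur : Nat) : cur ≤ pvSkipSeps s cur := by
  unfold pvSkipSeps
  split
  · split
    · have := pv_skipSeps_ge s (cur + 1); omega
    · exact le_refl _
  · exact le_refl _
termination_by s.length - cur

theorem pv_skipSeps_le (s : List Char) (cur : Nat) (h : cur ≤ s.length) :
    pvSkipSeps s cur ≤ s.length := by
  unfold pvSkipSeps
  split
  · split
    · exact pv_skipSeps_le s (cur + 1) (by omega)
    · omega
  · omega
termination_by s.length - cur

theorem pv_getD_set {α : Type} (dp : List (Option α)) (i j : Nat) (v : Option α)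
    (hi : i < dp.length) :
    (dp.set i v).getD j none = if j = i then v else dp.getD j none := by
  rcases eq_or_ne j i with rfl | hne
  · simp [List.getD, List.getElem?_set_self hi]
  · simp [List.getD, List.getElem?_set_ne (Ne.symm hne), hne]

-- the canonical value of A's memoized recursion at index: fuel len+1-index always suffices
def pvFA (nameL : List Char) (tools : List String) (index : Nat) : Option (List String) :=
  pvA_split nameL tools (nameL.length + 1 - index) index

-- startswith succeeds iff the candidate IS the slice of its own length (and it fits)
theorem pv_startsWith_iff (nameL : List Char) (c : String) (cur : Nat)
    (hcur : cur ≤ nameL.length) :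
    pvStartsWith nameL c.toList cur = true ↔
      (cur + c.toList.length ≤ nameL.length ∧
       c = String.ofList ((nameL.drop cur).take c.toList.length)) := by
  unfold pvStartsWith
  rw [beq_iff_eq]
  constructor
  · intro h
    have hl := congrArg List.length h
    simp only [List.length_take, List.length_drop] at hl
    refine ⟨by omega, ?_⟩
    rw [h, String.ofList_toList]
  · rintro ⟨hb, hc⟩
    have hcl : c.toList = (nameL.drop cur).take c.toList.length := by
      conv_lhs => rw [hc]
      simp
    conv_lhs => rw [← hcl]

-- GROUP lemma: scanning tools (weakly length-descending) equals scanning the distinct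
-- lengths (strictly descending), when each success names the slice of that length
theorem pv_group {β : Type} (ts : List String) (ls : List Nat)
    (w : Nat → String) (val : Nat → Option β)
    (hts : ts.Pairwise (fun a b => b.toList.length ≤ a.toList.length))
    (hls : ls.Pairwise (fun a b => a > b))
    (hlink : ∀ L, L ∈ ls ↔ ∃ c ∈ ts, c.toList.length = L)
    (hw : ∀ L, val L ≠ none → w L ∈ ts ∧ (w L).toList.length = L) :
    ts.findSome? (fun c => if c = w c.toList.length then val c.toList.length else none)
      = ls.findSome? val := by
  rw [pv_findSome?_eq_find?_bind, pv_findSome?_eq_find?_bind]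
  have hfc : ∀ c, ((if c = w c.toList.length then val c.toList.length else none).isSome = true)
      ↔ (c = w c.toList.length ∧ (val c.toList.length).isSome = true) := by
    intro c
    by_cases hc : c = w c.toList.length
    · rw [if_pos hc]; exact ⟨fun h => ⟨hc, h⟩, fun h => h.2⟩
    · rw [if_neg hc]; exact ⟨fun h => absurd h (by simp), fun h => absurd h.1 hc⟩
  cases h : ls.find? (fun L => (val L).isSome) with
  | none =>
    have hnone := List.find?_eq_none.1 h
    have : ts.find? (fun c => (if c = w c.toList.length then val c.toList.length else none).isSome) = none := by
      rw [List.find?_eq_none]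
      intro c hc hcp
      rcases (hfc c).1 hcp with ⟨hcw, hcs⟩
      exact hnone c.toList.length ((hlink _).2 ⟨c, hc, rfl⟩) hcs
    rw [this]; rfl
  | some L0 =>
    have hL0mem : L0 ∈ ls := List.mem_of_find?_eq_some h
    have hL0s : (val L0).isSome := by have := List.find?_some h; simpa using this
    have hmax : ∀ L ∈ ls, (val L).isSome → L ≤ L0 := by
      intro L hL hs
      rcases pv_find?_max hls h L hL hs with rfl | hlt
      · exact le_refl _
      · omega
    obtain ⟨hwmem, hwlen⟩ := hw L0 (Option.isSome_iff_ne_none.1 hL0s)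
    have hpc0 : (if w L0 = w (w L0).toList.length then val (w L0).toList.length else none).isSome = true := by
      rw [hfc]
      constructor
      · rw [hwlen]
      · rw [hwlen]; exact hL0s
    cases hfind : ts.find? (fun c => (if c = w c.toList.length then val c.toList.length else none).isSome) with
    | none =>
      exact absurd hpc0 (by simpa using List.find?_eq_none.1 hfind _ hwmem)
    | some c1 =>
      have hc1mem : c1 ∈ ts := List.mem_of_find?_eq_some hfind
      have hc1p := List.find?_some hfind
      rcases (hfc c1).1 hc1p with ⟨hc1w, hc1s⟩
      have hc1ls : c1.toList.length ∈ ls := (hlink _).2 ⟨c1, hc1mem, rfl⟩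
      have hle : c1.toList.length ≤ L0 := hmax _ hc1ls hc1s
      have hge : L0 ≤ c1.toList.length := by
        rcases pv_find?_max hts hfind _ hwmem hpc0 with heq | hlen
        · rw [← heq, hwlen]
        · rw [← hwlen]; exact hlen
      have hlen0 : c1.toList.length = L0 := le_antisymm hle hge
      simp only [Option.bind_some]
      rw [if_pos hc1w, hlen0]

-- fuel irrelevance for A's recursion under Pre_
theorem pv_fuel (nameL : List Char) (tools : List String)
    (htools : ∀ c ∈ tools, c.toList.length ≠ 0) :
    ∀ fuel index, index ≤ nameL.length → nameL.length + 1 - index ≤ fuel →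
      pvA_split nameL tools fuel index = pvFA nameL tools index := by
  intro fuel
  induction fuel using Nat.strong_induction_on with
  | _ fuel ih =>
    intro index hidx hfuel
    unfold pvFA
    obtain ⟨g, rfl⟩ : ∃ g, fuel = g + 1 := ⟨fuel - 1, by omega⟩
    obtain ⟨m, hm⟩ : ∃ m, nameL.length + 1 - index = m + 1 := ⟨nameL.length - index, by omega⟩
    rw [hm]
    simp only [pvA_split]
    by_cases hbig : nameL.length ≤ index
    · simp [hbig]
    · simp only [if_neg hbig]
      have hcur_le : (if 0 < index then pvSkipSeps nameL index else index) ≤ nameL.length := by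
        split
        · exact pv_skipSeps_le nameL index hidx
        · exact hidx
      have hcur_ge : index ≤ (if 0 < index then pvSkipSeps nameL index else index) := by
        split
        · exact pv_skipSeps_ge nameL index
        · exact le_refl _
      by_cases hsep : 0 < index ∧ nameL.length ≤ (if 0 < index then pvSkipSeps nameL index else index)
      · simp only [if_pos hsep]
      · simp only [if_neg hsep]
        apply pv_findSome?_congr
        intro c hc
        set current := if 0 < index then pvSkipSeps nameL index else index with hcdef
        by_cases hsw : pvStartsWith nameL c.toList current = true
        · simp only [if_pos hsw]
          have hle : current + c.toList.length ≤ nameL.length :=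
            ((pv_startsWith_iff nameL c current hcur_le).1 hsw).1
          have hgt : index < current + c.toList.length := by
            have := htools c hc; omega
          have h1 : pvA_split nameL tools g (current + c.toList.length)
              = pvFA nameL tools (current + c.toList.length) :=
            ih g (by omega) _ hle (by omega)
          have h2 : pvA_split nameL tools m (current + c.toList.length)
              = pvFA nameL tools (current + c.toList.length) :=
            ih m (by omega) _ hle (by omega)
          rw [h1, h2]
        · simp [hsw]

theorem pv_step_len (nameL : List Char) (lengths : List Nat) (toolSet : PySem.Set String)
    (i : Nat) (dp : List (Option (List String))) :
    (pvB_step nameL lengths toolSet i dp).length = dp.length := by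
  simp only [pvB_step]
  by_cases hsep : 0 < i ∧ nameL.length ≤ (if 0 < i then pvSkipSeps nameL i else i)
  · simp only [if_pos hsep, List.length_set]
  · simp only [if_neg hsep]
    split
    · simp
    · rfl

-- B's one step writes exactly A's value at index i (everything else untouched)
theorem pv_step_spec (nameL : List Char) (known_tools : List String)
    (hpre : "" ∉ known_tools) (i : Nat) (dp : List (Option (List String)))
    (hlen : dp.length = nameL.length + 1) (hi : i < nameL.length)
    (hdpi : dp.getD i none = none)
    (hdp : ∀ j, i + 1 ≤ j → j ≤ nameL.length → dp.getD j none = pvFA nameL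
      (PySem.List.sorted (PySem.Set.ofList known_tools) (fun t => t.toList.length) true) j) :
    ∀ j ≤ nameL.length,
      (pvB_step nameL
        (PySem.List.sorted (PySem.Set.ofList ((PySem.Set.ofList known_tools).map (fun t => t.toList.length))) (fun L => L) true)
        (PySem.Set.ofList known_tools) i dp).getD j none =
      if j = i then pvFA nameL (PySem.List.sorted (PySem.Set.ofList known_tools) (fun t => t.toList.length) true) j
      else dp.getD j none := by
  intro j hj
  set tools := PySem.List.sorted (PySem.Set.ofList known_tools) (fun t => t.toList.length) true with htoolsdef
  set lengths := PySem.List.sorted (PySem.Set.ofList ((PySem.Set.ofList known_tools).map (fun t => t.toList.length))) (fun L => L) true with hlengthsdef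
  have hidp : i < dp.length := by omega
  have hmemt : ∀ c : String, c ∈ tools ↔ c ∈ known_tools := by
    intro c
    rw [htoolsdef, PySem.List.mem_sorted, PySem.Set.mem_ofList]
  have htne : ∀ c ∈ tools, c.toList.length ≠ 0 := by
    intro c hc h0
    have hnil : c.toList = [] := List.length_eq_zero_iff.1 h0
    have : c = "" := by
      have h := congrArg String.ofList hnil
      rw [String.ofList_toList] at h
      simpa using h
    exact hpre (this ▸ (hmemt c).1 hc)
  have hmemL : ∀ L : Nat, L ∈ lengths ↔ ∃ c ∈ tools, c.toList.length = L := by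
    intro L
    rw [hlengthsdef, PySem.List.mem_sorted, PySem.Set.mem_ofList, List.mem_map]
    constructor
    · rintro ⟨t, ht, rfl⟩
      exact ⟨t, (hmemt t).2 ((PySem.Set.mem_ofList _ _).1 ht), rfl⟩
    · rintro ⟨c, hc, rfl⟩
      exact ⟨c, (PySem.Set.mem_ofList _ _).2 ((hmemt c).1 hc), rfl⟩
  have hL1 : ∀ L ∈ lengths, 1 ≤ L := by
    intro L hL
    obtain ⟨c, hc, rfl⟩ := (hmemL L).1 hL
    have := htne c hc; omega
  have hcur_ge : i ≤ (if 0 < i then pvSkipSeps nameL i else i) := by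
    split
    · exact pv_skipSeps_ge nameL i
    · exact le_refl _
  have hcur_le : (if 0 < i then pvSkipSeps nameL i else i) ≤ nameL.length := by
    split
    · exact pv_skipSeps_le nameL i (by omega)
    · omega
  simp only [pvB_step]
  by_cases hsep : 0 < i ∧ nameL.length ≤ (if 0 < i then pvSkipSeps nameL i else i)
  · -- separators run to the end: both dp[i] := [] and A's value is some []
    rw [if_pos hsep, pv_getD_set dp i j _ hidp]
    rcases eq_or_ne j i with rfl | hne
    · rw [if_pos rfl, if_pos rfl]
      unfold pvFA
      obtain ⟨m, hm⟩ : ∃ m, nameL.length + 1 - j = m + 1 := ⟨nameL.length - j, by omega⟩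
      rw [hm]
      simp only [pvA_split]
      rw [if_neg (by omega), if_pos hsep]
    · rw [if_neg hne, if_neg hne]
  · rw [if_neg hsep]
    set cur := if 0 < i then pvSkipSeps nameL i else i with hcurdef
    have hcur_lt : cur < nameL.length := by
      by_cases h0 : 0 < i
      · rcases Nat.lt_or_ge cur nameL.length with h | h
        · exact h
        · exact absurd ⟨h0, h⟩ hsep
      · have : i = 0 := by omega
        simp [hcurdef, this]; omega
    -- val L: B's candidate at length L, with A's table value as the continuation
    set val : Nat → Option (List String) := fun L =>
      if cur + L ≤ nameL.length ∧
          PySem.Set.contains (PySem.Set.ofList known_tools) (String.ofList ((nameL.drop cur).take L)) then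
        match pvFA nameL tools (cur + L) with
        | some rest => some (String.ofList ((nameL.drop cur).take L) :: rest)
        | none => none
      else none with hvaldef
    have hcongr1 : lengths.findSome? (fun L =>
        if cur + L ≤ nameL.length ∧
            PySem.Set.contains (PySem.Set.ofList known_tools) (String.ofList ((nameL.drop cur).take L)) then
          match dp.getD (cur + L) none with
          | some rest => some (String.ofList ((nameL.drop cur).take L) :: rest)
          | none => none
        else none) = lengths.findSome? val := by
      apply pv_findSome?_congr
      intro L hL
      rw [hvaldef]
      beta_reduce
      by_cases hg : cur + L ≤ nameL.length ∧
          PySem.Set.contains (PySem.Set.ofList known_tools) (String.ofList ((nameL.drop cur).take L)) = true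
      · rw [if_pos hg, if_pos hg, hdp (cur + L) (by have := hL1 L hL; omega) hg.1]
      · rw [if_neg hg, if_neg hg]
    have hw : ∀ L, val L ≠ none →
        String.ofList ((nameL.drop cur).take L) ∈ tools ∧
        (String.ofList ((nameL.drop cur).take L)).toList.length = L := by
      intro L hvL
      rw [hvaldef] at hvL
      beta_reduce at hvL
      by_cases hg : cur + L ≤ nameL.length ∧
          PySem.Set.contains (PySem.Set.ofList known_tools) (String.ofList ((nameL.drop cur).take L)) = true
      · refine ⟨(hmemt _).2 ((PySem.Set.mem_ofList _ _).1 ((PySem.Set.contains_iff _ _).1 hg.2)), ?_⟩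
        simp only [String.toList_ofList, List.length_take, List.length_drop]
        omega
      · exact absurd (by rw [if_neg hg]) hvL
    have hFAi : pvFA nameL tools i = lengths.findSome? val := by
      unfold pvFA
      obtain ⟨m, hm⟩ : ∃ m, nameL.length + 1 - i = m + 1 := ⟨nameL.length - i, by omega⟩
      rw [hm]
      simp only [pvA_split]
      rw [if_neg (by omega : ¬ nameL.length ≤ i), if_neg hsep]
      have hstep2 : ∀ c ∈ tools,
          (if pvStartsWith nameL c.toList cur then
            match pvA_split nameL tools m (cur + c.toList.length) with
            | some r => some (c :: r)
            | none => none
          else none)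
          = if c = String.ofList ((nameL.drop cur).take c.toList.length) then val c.toList.length else none := by
        intro c hc
        by_cases hsw : pvStartsWith nameL c.toList cur = true
        · obtain ⟨hb, hcw⟩ := (pv_startsWith_iff nameL c cur hcur_le).1 hsw
          rw [if_pos hsw, if_pos hcw, hvaldef]
          beta_reduce
          have hgd : cur + c.toList.length ≤ nameL.length ∧
              PySem.Set.contains (PySem.Set.ofList known_tools)
                (String.ofList ((nameL.drop cur).take c.toList.length)) = true := by
            refine ⟨hb, (PySem.Set.contains_iff _ _).2 ?_⟩
            rw [← hcw]
            exact (PySem.Set.mem_ofList _ _).2 ((hmemt c).1 hc)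
          rw [if_pos hgd]
          rw [pv_fuel nameL tools htne m (cur + c.toList.length) hb
            (by have := htne c hc; have := hcur_ge; omega)]
          rw [← hcw]
        · rw [if_neg (by simpa using hsw)]
          by_cases hcw : c = String.ofList ((nameL.drop cur).take c.toList.length)
          · rw [if_pos hcw, hvaldef]
            beta_reduce
            rw [if_neg ?_]
            intro hgd
            exact hsw ((pv_startsWith_iff nameL c cur hcur_le).2 ⟨hgd.1, hcw⟩)
          · rw [if_neg hcw]
      rw [pv_findSome?_congr _ _ _ hstep2]
      apply pv_group tools lengths (fun L => String.ofList ((nameL.drop cur).take L)) val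
      · exact PySem.List.sorted_pairwise_rev _ _
      · have h1 := PySem.List.sorted_pairwise_rev (PySem.Set.ofList ((PySem.Set.ofList known_tools).map (fun t => t.toList.length))) (fun L => L)
        have h2 : lengths.Nodup := by
          have := PySem.List.sorted_perm (PySem.Set.ofList ((PySem.Set.ofList known_tools).map (fun t => t.toList.length))) (fun L : Nat => L) true
          exact this.nodup_iff.2 (PySem.Set.nodup_ofList _)
        have := List.Pairwise.and h1 h2
        exact this.imp (fun h => lt_of_le_of_ne h.1 (Ne.symm h.2))
      · exact hmemL
      · exact hw
    rw [hcongr1]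
    cases hfs : lengths.findSome? val with
    | none =>
      rcases eq_or_ne j i with rfl | hne
      · rw [if_pos rfl, hFAi, hfs, hdpi]
      · rw [if_neg hne]
    | some v =>
      rw [pv_getD_set dp i j _ hidp]
      rcases eq_or_ne j i with rfl | hne
      · rw [if_pos rfl, if_pos rfl, hFAi, hfs]
      · rw [if_neg hne, if_neg hne]

theorem pv_iter_spec (nameL : List Char) (known_tools : List String)
    (hpre : "" ∉ known_tools) :
    ∀ k, k ≤ nameL.length → ∀ dp, dp.length = nameL.length + 1 →
      (∀ j, j < k → dp.getD j none = none) →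
      (∀ j, k ≤ j → j ≤ nameL.length → dp.getD j none = pvFA nameL
        (PySem.List.sorted (PySem.Set.ofList known_tools) (fun t => t.toList.length) true) j) →
      ∀ j ≤ nameL.length,
        (pvB_iter nameL
          (PySem.List.sorted (PySem.Set.ofList ((PySem.Set.ofList known_tools).map (fun t => t.toList.length))) (fun L => L) true)
          (PySem.Set.ofList known_tools) k dp).getD j none =
        pvFA nameL (PySem.List.sorted (PySem.Set.ofList known_tools) (fun t => t.toList.length) true) j := by
  intro k
  induction k with
  | zero =>
    intro _ dp _ _ hdp j hj
    exact hdp j (Nat.zero_le j) hj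
  | succ k ih =>
    intro hk dp hlen hlow hdp j hj
    simp only [pvB_iter]
    have hstep := pv_step_spec nameL known_tools hpre k dp hlen (by omega)
      (hlow k (by omega)) (fun j h1 h2 => hdp j h1 h2)
    apply ih (by omega)
    · rw [pv_step_len, hlen]
    · intro j' hj'
      rw [hstep j' (by omega), if_neg (by omega), hlow j' (by omega)]
    · intro j' h1 h2
      rw [hstep j' h2]
      rcases eq_or_ne j' k with rfl | hne
      · rw [if_pos rfl]
      · rw [if_neg hne]
        exact hdp j' (by omega) h2
    · exact hj

-- ===== VERDICT (by name: the statement is the Claim_ definition above) =====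
theorem split_known_tools_spec : Claim_equal_split_known_tools := by
  intro name known_tools _ hpre
  unfold Spec_split_known_tools
  simp only [split_known_tools, split_known_tools_alt]
  have hkey : (pvB_iter name.toList
      (PySem.List.sorted (PySem.Set.ofList ((PySem.Set.ofList known_tools).map (fun t => t.toList.length))) (fun L => L) true)
      (PySem.Set.ofList known_tools) name.toList.length
      (List.replicate name.toList.length none ++ [some []])).getD 0 none
      = pvFA name.toList (PySem.List.sorted (PySem.Set.ofList known_tools) (fun t => t.toList.length) true) 0 := by
    apply pv_iter_spec name.toList known_tools hpre name.toList.length (le_refl _)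
    · simp
    · intro j hjl
      rw [List.getD, List.getElem?_append_left (by simpa using hjl)]
      simp
    · intro j h1 h2
      have hj : j = name.toList.length := by omega
      subst hj
      rw [List.getD, List.getElem?_append_right (by simp)]
      simp only [List.length_replicate, Nat.sub_self]
      unfold pvFA
      have : name.toList.length + 1 - name.toList.length = 1 := by omega
      rw [this]
      simp [pvA_split]
    · exact Nat.zero_le _
  rw [hkey]
  unfold pvFA
  rfl
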